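-- pv_equiv track=rewrite | github.com/zeroCass/tdd-8-queens-problem | eight_queens.py | is_solution_to_8_queens_problem
-- ===== SOURCE A (Python) =====
-- def is_valid_board(board: list) -> bool:
--     """ check if the board has size of 8x8 """
--     # check if the board has 8 rows
--     if len(board) != 8:
--         return False
--
--     # check if the board has 8 columns
--     for row in board:
--         if len(row) != 8:
--             return False
--     return True
--
-- def has_eight_queens(board: list) -> bool:
--     """ check if the board has 8 queens """
--     total_queens = 0
--
--     for row in board:
--         for element in row:
--             if element == 1:
--                 total_queens += 1
--     if total_queens == 8:
--         return True
--     return False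
--
-- def has_queen_in_column(board: list, current_row: int, current_column: int) -> bool:
--     """ check if there another queen in the same column of the actual queen """
--     for row in range(8):
--         if board[row][current_column] == 1 and row != current_row:
--             return True
--     return False
--
-- def has_queen_in_row(board: list, current_row: int, curent_column: int) -> bool:
--     """ check if theres another queen in the current row of the actual queen """
--     for colum in range(8):
--         if board[current_row][colum] == 1 and colum != curent_column:
--             return True
--     return False
--
-- def has_queen_in_main_diagonal(board: list, current_row: int, current_column: int) -> bool:
--     """ check if there another queen in main diagonal of the current queen
--     (top-right and bottom-left diagonals) """
--     # top-right
--     for row, column in zip(range(current_row, -1, -1), range(current_column, 8, 1)):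
--         if row == current_row and column == current_column:
--             continue
--         if board[row][column] == 1:
--             return True
--     # bottom-left
--     for row, column in zip(range(current_row, 8, 1), range(current_column, -1, -1)):
--         if row == current_row and column == current_column:
--             continue
--         if board[row][column] == 1:
--             return True
--
--     return False
--
-- def has_queen_in_cross_diagonal(board: list, current_row: int, current_column: int) -> bool:
--     """ check if there another queen in cross diagonal of the current queen
--     (top-left and bottom-right diagonals) """
--     # top-left
--     for row, column in zip(range(current_row, -1, -1), range(current_column, -1, -1)):
--         if row == current_row and column == current_column:
--             continue
--         if board[row][column] == 1:
--             return True
--     # bottom-right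
--     for row, column in zip(range(current_row, 8, 1), range(current_column, 8, 1)):
--         if row == current_row and column == current_column:
--             continue
--         if board[row][column] == 1:
--             return True
--
--     return False
--
-- def is_solution_to_8_queens_problem(board: list) -> int:
--     """ check the input it is a soluction for the 8 queens problem """
--     if not is_valid_board(board):
--         return -1
--     if not has_eight_queens(board):
--         return -1
--     for row in range(8):
--         for column in range(8):
--             if board[row][column] == 1:
--                 if has_queen_in_row(board, row, column):
--                     return 0
--                 if has_queen_in_column(board, row, column):
--                     return 0
--                 if has_queen_in_main_diagonal(board, row, column):
--                     return 0
--                 if has_queen_in_cross_diagonal(board, row, column):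
--                     return 0
--     return 1
-- ===== SOURCE B (Python) =====
-- def is_solution_to_8_queens_problem(board: list) -> int:
--     """ check the input it is a soluction for the 8 queens problem """
--     if len(board) != 8 or any(len(row) != 8 for row in board):
--         return -1
--     queens = [(r, c) for r, row in enumerate(board) for c, v in enumerate(row) if v == 1]
--     if len(queens) != 8:
--         return -1
--     for key in (lambda p: p[0], lambda p: p[1], lambda p: p[0] - p[1], lambda p: p[0] + p[1]):
--         if len({key(p) for p in queens}) < 8:
--             return 0
--     return 1
-- ===== Notes on version B (the rewrite author's own statement) =====
-- stated objective: simpler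
-- what changed: Replaces A's four per-queen directional scans (row, column, and two zip-range diagonal walks for each of the 64 cells) by one pass that collects queen coordinates and then checks that the dedup-sets of rows, columns, r-c and r+c diagonal keys each have 8 distinct values.
import Mathlib
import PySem

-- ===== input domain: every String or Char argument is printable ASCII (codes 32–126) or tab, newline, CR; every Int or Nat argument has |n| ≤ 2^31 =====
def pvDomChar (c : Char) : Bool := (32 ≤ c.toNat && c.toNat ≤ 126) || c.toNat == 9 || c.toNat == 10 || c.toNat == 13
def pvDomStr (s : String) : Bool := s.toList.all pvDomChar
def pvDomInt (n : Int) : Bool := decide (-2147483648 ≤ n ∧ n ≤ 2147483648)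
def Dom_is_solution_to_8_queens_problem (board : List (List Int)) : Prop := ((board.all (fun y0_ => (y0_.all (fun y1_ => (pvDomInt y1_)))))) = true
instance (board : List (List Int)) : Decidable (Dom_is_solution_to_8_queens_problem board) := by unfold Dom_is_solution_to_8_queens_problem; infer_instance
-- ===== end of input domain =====

-- B replaces A's four per-queen directional scans by one pass collecting queen coordinates
-- and four dedup-set cardinality checks (rows, columns, r-c, r+c); objective: simpler.

-- ===== PORT A =====
-- board[r][c] as a total lookup: in A every evaluation happens after is_valid_board has
-- guaranteed 0 ≤ r,c < 8 on an 8x8 board, so the defaults are never hit.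
def pvCellA (board : List (List Int)) (r c : Int) : Int :=
  PySem.List.pyGetD (PySem.List.pyGetD board r []) c 0

def pvIsValidBoard (board : List (List Int)) : Bool :=
  if board.length ≠ 8 then false
  else !board.any (fun row => decide (row.length ≠ 8))

def pvHasEightQueens (board : List (List Int)) : Bool :=
  let total : Int :=
    board.foldl (fun acc row => row.foldl (fun acc2 e => if e == 1 then acc2 + 1 else acc2) acc) 0
  total == 8

def pvHasQueenInColumn (board : List (List Int)) (current_row current_column : Int) : Bool :=
  (PySem.List.pyRange 0 8 1).any fun row =>
    pvCellA board row current_column == 1 && decide (row ≠ current_row)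

def pvHasQueenInRow (board : List (List Int)) (current_row curent_column : Int) : Bool :=
  (PySem.List.pyRange 0 8 1).any fun colum =>
    pvCellA board current_row colum == 1 && decide (colum ≠ curent_column)

def pvHasQueenInMainDiagonal (board : List (List Int)) (current_row current_column : Int) : Bool :=
  -- top-right
  ((((PySem.List.pyRange current_row (-1) (-1)).zip (PySem.List.pyRange current_column 8 1)).any fun p =>
    if p.1 = current_row ∧ p.2 = current_column then false
    else pvCellA board p.1 p.2 == 1)
  ||
  -- bottom-left
  (((PySem.List.pyRange current_row 8 1).zip (PySem.List.pyRange current_column (-1) (-1))).any fun p =>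
    if p.1 = current_row ∧ p.2 = current_column then false
    else pvCellA board p.1 p.2 == 1))

def pvHasQueenInCrossDiagonal (board : List (List Int)) (current_row current_column : Int) : Bool :=
  -- top-left
  ((((PySem.List.pyRange current_row (-1) (-1)).zip (PySem.List.pyRange current_column (-1) (-1))).any fun p =>
    if p.1 = current_row ∧ p.2 = current_column then false
    else pvCellA board p.1 p.2 == 1)
  ||
  -- bottom-right
  (((PySem.List.pyRange current_row 8 1).zip (PySem.List.pyRange current_column 8 1)).any fun p =>
    if p.1 = current_row ∧ p.2 = current_column then false
    else pvCellA board p.1 p.2 == 1))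

def is_solution_to_8_queens_problem (board : List (List Int)) : Int :=
  if !pvIsValidBoard board then -1
  else if !pvHasEightQueens board then -1
  else if (PySem.List.pyRange 0 8 1).any (fun row =>
      (PySem.List.pyRange 0 8 1).any fun column =>
        pvCellA board row column == 1 &&
          (pvHasQueenInRow board row column || pvHasQueenInColumn board row column ||
           pvHasQueenInMainDiagonal board row column || pvHasQueenInCrossDiagonal board row column))
  then 0 else 1

-- ===== PORT B =====
def pvQueens (board : List (List Int)) : List (Int × Int) :=
  (PySem.List.enumerate board 0).flatMap fun rrow =>
    ((PySem.List.enumerate rrow.2 0).filter (fun cv => cv.2 == 1)).map fun cv => (rrow.1, cv.1)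

def pvKeys : List ((Int × Int) → Int) :=
  [fun p => p.1, fun p => p.2, fun p => p.1 - p.2, fun p => p.1 + p.2]

def is_solution_to_8_queens_problem_alt (board : List (List Int)) : Int :=
  if board.length ≠ 8 ∨ (board.any fun row => decide (row.length ≠ 8)) = true then -1
  else
    let queens := pvQueens board
    if queens.length ≠ 8 then -1
    else if pvKeys.any (fun key => decide ((PySem.Set.ofList (queens.map key)).length < 8)) then 0
    else 1

-- ===== PRECONDITION & SPEC =====
def Spec_is_solution_to_8_queens_problem (board : List (List Int)) (out : Int) : Prop := out = is_solution_to_8_queens_problem_alt board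
instance (board : List (List Int)) (out : Int) : Decidable (Spec_is_solution_to_8_queens_problem board out) := by unfold Spec_is_solution_to_8_queens_problem; infer_instance

-- ===== CLAIM (what is proved, stated in full; the proofs are below) =====
def Claim_equal_is_solution_to_8_queens_problem : Prop := ∀ (board : List (List Int)), Dom_is_solution_to_8_queens_problem board → Spec_is_solution_to_8_queens_problem board (is_solution_to_8_queens_problem board)

-- ===== LEMMAS AND PROOFS =====

/-- The shape both first guards test: an 8×8 board. -/
def pvShape (board : List (List Int)) : Prop :=
  board.length = 8 ∧ ∀ row ∈ board, row.length = 8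

/-- Two distinct queens attack each other (same row, column, anti-diagonal or diagonal). -/
def pvConf (board : List (List Int)) : Prop :=
  ∃ p ∈ pvQueens board, ∃ q ∈ pvQueens board,
    q ≠ p ∧ (p.1 = q.1 ∨ p.2 = q.2 ∨ p.1 + p.2 = q.1 + q.2 ∨ p.1 - p.2 = q.1 - q.2)

lemma pvValid_iff (board : List (List Int)) : pvIsValidBoard board = true ↔ pvShape board := by
  unfold pvIsValidBoard pvShape
  split_ifs with h
  · simp only [Bool.false_eq_true, false_iff]
    rintro ⟨h1, -⟩
    exact h h1
  · push_neg at h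
    simp [List.any_eq_true, h]

lemma pvMem_queens (board : List (List Int)) (hs : pvShape board) (r c : Int) :
    (r, c) ∈ pvQueens board ↔ 0 ≤ r ∧ r < 8 ∧ 0 ≤ c ∧ c < 8 ∧ pvCellA board r c = 1 := by
  obtain ⟨hlen, hrows⟩ := hs
  unfold pvQueens
  rw [List.mem_flatMap]
  constructor
  · rintro ⟨rrow, hrrow, hmem⟩
    rw [PySem.List.mem_enumerate_iff] at hrrow
    obtain ⟨k, hk, rfl⟩ := hrrow
    simp only [List.mem_map, List.mem_filter] at hmem
    obtain ⟨cv, ⟨hcvmem, hcv1⟩, heq⟩ := hmem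
    rw [PySem.List.mem_enumerate_iff] at hcvmem
    obtain ⟨m, hm, rfl⟩ := hcvmem
    simp only [Prod.mk.injEq] at heq
    obtain ⟨hr, hc⟩ := heq
    have hrowlen : board[k].length = 8 := hrows _ (List.getElem_mem hk)
    rw [beq_iff_eq] at hcv1
    have hcell : pvCellA board r c = 1 := by
      rw [← hr, ← hc]
      simp only [pvCellA, zero_add, PySem.List.pyGetD_natCast]
      rw [List.getD_eq_getElem _ _ hk, List.getD_eq_getElem _ _ hm]
      exact hcv1
    refine ⟨by omega, by omega, by omega, by omega, hcell⟩
  · rintro ⟨hr0, hr8, hc0, hc8, hcell⟩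
    have hkr : r.toNat < board.length := by omega
    have hrowlen : board[r.toNat].length = 8 := hrows _ (List.getElem_mem hkr)
    have hkc : c.toNat < board[r.toNat].length := by omega
    refine ⟨(r, board[r.toNat]), ?_, ?_⟩
    · rw [PySem.List.mem_enumerate_iff]
      exact ⟨r.toNat, hkr, by rw [Prod.mk.injEq]; exact ⟨by omega, rfl⟩⟩
    · simp only [List.mem_map, List.mem_filter]
      refine ⟨(c, board[r.toNat][c.toNat]), ⟨?_, ?_⟩, ?_⟩
      · rw [PySem.List.mem_enumerate_iff]
        exact ⟨c.toNat, hkc, by rw [Prod.mk.injEq]; exact ⟨by omega, rfl⟩⟩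
      · rw [beq_iff_eq]
        have : pvCellA board r c = board[r.toNat][c.toNat] := by
          have hr' : r = ((r.toNat : Nat) : Int) := by omega
          have hc' : c = ((c.toNat : Nat) : Int) := by omega
          conv_lhs => rw [hr', hc']
          simp only [pvCellA, PySem.List.pyGetD_natCast]
          rw [List.getD_eq_getElem _ _ hkr, List.getD_eq_getElem _ _ hkc]
        rw [← this]
        exact hcell
      · rfl
  
lemma pvFst_flatMap_le (rows : List (List Int)) (s : Int) (p : Int × Int)
    (h : p ∈ (PySem.List.enumerate rows s).flatMap fun rrow =>
      ((PySem.List.enumerate rrow.2 0).filter (fun cv => cv.2 == 1)).map fun cv => (rrow.1, cv.1)) :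
    s ≤ p.1 := by
  rw [List.mem_flatMap] at h
  obtain ⟨rrow, hrrow, hmem⟩ := h
  rw [PySem.List.mem_enumerate_iff] at hrrow
  obtain ⟨k, hk, rfl⟩ := hrrow
  simp only [List.mem_map] at hmem
  obtain ⟨cv, -, heq⟩ := hmem
  rw [← heq]
  simp only []
  omega

lemma pvNodup_aux (rows : List (List Int)) (s : Int) :
    ((PySem.List.enumerate rows s).flatMap fun rrow =>
      ((PySem.List.enumerate rrow.2 0).filter (fun cv => cv.2 == 1)).map fun cv => (rrow.1, cv.1)).Nodup := by
  induction rows generalizing s with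
  | nil => simp [PySem.List.enumerate_nil]
  | cons row rest ih =>
    rw [PySem.List.enumerate_cons, List.flatMap_cons]
    refine List.Nodup.append ?_ (ih (s + 1)) ?_
    · apply List.Nodup.map_on
      · intro x hx y hy hxy
        rw [List.mem_filter] at hx hy
        rw [PySem.List.mem_enumerate_iff] at *
        obtain ⟨kx, hkx, rfl⟩ := hx.1
        obtain ⟨ky, hky, rfl⟩ := hy.1
        simp only [Prod.mk.injEq] at hxy ⊢
        have : kx = ky := by omega
        subst this
        exact ⟨rfl, rfl⟩
      · apply List.Nodup.filter
        apply List.Nodup.of_map Prod.fst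
        rw [PySem.List.map_fst_enumerate]
        exact PySem.List.nodup_pyRange_one _ _
    · intro a ha hb
      have h1 : s + 1 ≤ a.1 := pvFst_flatMap_le rest (s + 1) a hb
      rw [List.mem_map] at ha
      obtain ⟨cv, -, heq⟩ := ha
      rw [← heq] at h1
      simp only [] at h1
      omega

lemma pvNodup_queens (board : List (List Int)) : (pvQueens board).Nodup := by
  unfold pvQueens
  exact pvNodup_aux board 0

lemma pvCount_iff (board : List (List Int)) :
    pvHasEightQueens board = true ↔ (pvQueens board).length = 8 := by
  unfold pvHasEightQueens
  have htot : board.foldl (fun acc row =>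
        row.foldl (fun acc2 e => if e == 1 then acc2 + 1 else acc2) acc) 0
      = (0 : Int) + (board.map (fun row : List Int => ((row.count 1 : Nat) : Int))).sum := by
    have hfun : (fun (acc : Int) (row : List Int) =>
          row.foldl (fun acc2 e => if e == 1 then acc2 + 1 else acc2) acc)
        = fun acc row => acc + ((row.count 1 : Nat) : Int) := by
      funext acc row
      simp only [PySem.List.foldl_beq_add_one]
    rw [hfun]
    simp only [PySem.List.foldl_add]
  have hqlen : (pvQueens board).length = (board.map (fun row : List Int => row.count 1)).sum := by
    unfold pvQueens
    rw [List.length_flatMap]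
    have hlenmap : ∀ (rrow : Int × List Int),
        (((PySem.List.enumerate rrow.2 0).filter (fun cv => cv.2 == 1)).map
          fun cv => (rrow.1, cv.1)).length = rrow.2.count 1 := by
      intro rrow
      rw [List.length_map, ← List.countP_eq_length_filter]
      have h1 : (PySem.List.enumerate rrow.2 0).countP (fun cv => cv.2 == 1)
          = ((PySem.List.enumerate rrow.2 0).map (fun cv => cv.2)).countP (fun v => v == 1) := by
        rw [List.countP_map]
        rfl
      rw [h1, PySem.List.map_snd_enumerate]
      rfl
    rw [List.map_congr_left (fun rrow _ => hlenmap rrow)]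
    have hmm : (PySem.List.enumerate board 0).map (fun rrow => List.count 1 rrow.2)
        = board.map (fun row : List Int => row.count 1) := by
      have h2 : (fun rrow : Int × List Int => List.count 1 rrow.2)
          = (fun row : List Int => List.count 1 row) ∘ (fun rrow : Int × List Int => rrow.2) := rfl
      rw [h2, ← List.map_map, PySem.List.map_snd_enumerate]
    rw [hmm]
  rw [htot, beq_iff_eq, hqlen, zero_add]
  have hcast : (board.map (fun row : List Int => ((row.count 1 : Nat) : Int))).sum
      = ((board.map (fun row : List Int => row.count 1)).sum : Int) := by
    rw [Nat.cast_list_sum, List.map_map]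
    rfl
  rw [hcast]
  omega

lemma pvRow_iff (board : List (List Int)) (hs : pvShape board) (r c : Int)
    (hr0 : 0 ≤ r) (hr8 : r < 8) :
    pvHasQueenInRow board r c = true ↔ ∃ c', (r, c') ∈ pvQueens board ∧ c' ≠ c := by
  unfold pvHasQueenInRow
  rw [List.any_eq_true]
  constructor
  · rintro ⟨col, hcol, hp⟩
    rw [PySem.List.mem_pyRange_one] at hcol
    simp only [Bool.and_eq_true, beq_iff_eq, decide_eq_true_eq] at hp
    exact ⟨col, (pvMem_queens board hs r col).2 ⟨hr0, hr8, hcol.1, hcol.2, hp.1⟩, hp.2⟩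
  · rintro ⟨c', hmem, hne⟩
    obtain ⟨-, -, hc0, hc8, hcell⟩ := (pvMem_queens board hs r c').1 hmem
    exact ⟨c', PySem.List.mem_pyRange_one.2 ⟨hc0, hc8⟩, by simp [hcell, hne]⟩

lemma pvCol_iff (board : List (List Int)) (hs : pvShape board) (r c : Int)
    (hc0 : 0 ≤ c) (hc8 : c < 8) :
    pvHasQueenInColumn board r c = true ↔ ∃ r', (r', c) ∈ pvQueens board ∧ r' ≠ r := by
  unfold pvHasQueenInColumn
  rw [List.any_eq_true]
  constructor
  · rintro ⟨row, hrow, hp⟩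
    rw [PySem.List.mem_pyRange_one] at hrow
    simp only [Bool.and_eq_true, beq_iff_eq, decide_eq_true_eq] at hp
    exact ⟨row, (pvMem_queens board hs row c).2 ⟨hrow.1, hrow.2, hc0, hc8, hp.1⟩, hp.2⟩
  · rintro ⟨r', hmem, hne⟩
    obtain ⟨hr0, hr8, -, -, hcell⟩ := (pvMem_queens board hs r' c).1 hmem
    exact ⟨r', PySem.List.mem_pyRange_one.2 ⟨hr0, hr8⟩, by simp [hcell, hne]⟩

lemma pvGet_pyRange_neg_one (a b : Int) (k : Nat)
    (hk : k < (PySem.List.pyRange a b (-1)).length) :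
    (PySem.List.pyRange a b (-1))[k] = a - k := by
  simp [PySem.List.pyRange_neg_one] at hk ⊢

lemma pvGet_pyRange_one (a b : Int) (k : Nat)
    (hk : k < (PySem.List.pyRange a b 1).length) :
    (PySem.List.pyRange a b 1)[k] = a + k := by
  simp [PySem.List.pyRange_one] at hk ⊢

lemma pvMem_zip {l1 l2 : List Int} {p : Int × Int} :
    p ∈ l1.zip l2 ↔ ∃ k : Nat, ∃ _ : k < l1.length, ∃ _ : k < l2.length,
      p = (l1[k], l2[k]) := by
  constructor
  · intro h
    obtain ⟨k, hk, hget⟩ := List.mem_iff_getElem.1 h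
    rw [List.length_zip] at hk
    refine ⟨k, by omega, by omega, ?_⟩
    rw [← hget, List.getElem_zip]
  · rintro ⟨k, h1, h2, rfl⟩
    refine List.mem_iff_getElem.2 ⟨k, by rw [List.length_zip]; omega, ?_⟩
    rw [List.getElem_zip]

lemma pvMain_iff (board : List (List Int)) (hs : pvShape board) (r c : Int)
    (hr0 : 0 ≤ r) (hr8 : r < 8) (hc0 : 0 ≤ c) (hc8 : c < 8) :
    pvHasQueenInMainDiagonal board r c = true ↔
      ∃ q ∈ pvQueens board, q ≠ (r, c) ∧ q.1 + q.2 = r + c := by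
  unfold pvHasQueenInMainDiagonal
  rw [Bool.or_eq_true, List.any_eq_true, List.any_eq_true]
  constructor
  · rintro (⟨p, hp, hpred⟩ | ⟨p, hp, hpred⟩)
    · obtain ⟨k, h1, h2, rfl⟩ := pvMem_zip.1 hp
      rw [PySem.List.length_pyRange_neg_one] at h1
      rw [PySem.List.length_pyRange_one] at h2
      rw [pvGet_pyRange_neg_one _ _ _ (by rw [PySem.List.length_pyRange_neg_one]; omega),
          pvGet_pyRange_one _ _ _ (by rw [PySem.List.length_pyRange_one]; omega)] at hpred
      by_cases hk0 : k = 0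
      · subst hk0; simp at hpred
      · rw [if_neg (by simp only [not_and]; intro h; omega)] at hpred
        rw [beq_iff_eq] at hpred
        refine ⟨(r - k, c + k),
          (pvMem_queens board hs _ _).2 ⟨by omega, by omega, by omega, by omega, hpred⟩,
          by simp only [ne_eq, Prod.mk.injEq, not_and]; intro h; omega, by omega⟩
    · obtain ⟨k, h1, h2, rfl⟩ := pvMem_zip.1 hp
      rw [PySem.List.length_pyRange_one] at h1
      rw [PySem.List.length_pyRange_neg_one] at h2
      rw [pvGet_pyRange_one _ _ _ (by rw [PySem.List.length_pyRange_one]; omega),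
          pvGet_pyRange_neg_one _ _ _ (by rw [PySem.List.length_pyRange_neg_one]; omega)] at hpred
      by_cases hk0 : k = 0
      · subst hk0; simp at hpred
      · rw [if_neg (by simp only [not_and]; intro h; omega)] at hpred
        rw [beq_iff_eq] at hpred
        refine ⟨(r + k, c - k),
          (pvMem_queens board hs _ _).2 ⟨by omega, by omega, by omega, by omega, hpred⟩,
          by simp only [ne_eq, Prod.mk.injEq, not_and]; intro h; omega, by omega⟩
  · rintro ⟨⟨r', c'⟩, hq, hne, hsum⟩
    obtain ⟨hr'0, hr'8, hc'0, hc'8, hcell⟩ := (pvMem_queens board hs r' c').1 hq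
    simp only [ne_eq, Prod.mk.injEq, not_and] at hne
    have hrne : r' ≠ r := by
      intro h
      subst h
      exact hne rfl (by omega)
    by_cases hlt : r' < r
    · left
      refine ⟨(r', c'), pvMem_zip.2 ⟨(r - r').toNat, ?_, ?_, ?_⟩, ?_⟩
      · rw [PySem.List.length_pyRange_neg_one]; omega
      · rw [PySem.List.length_pyRange_one]; omega
      · rw [pvGet_pyRange_neg_one _ _ _ (by rw [PySem.List.length_pyRange_neg_one]; omega),
            pvGet_pyRange_one _ _ _ (by rw [PySem.List.length_pyRange_one]; omega)]
        simp only [Prod.mk.injEq]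
        constructor <;> omega
      · rw [if_neg (fun h => hrne h.1)]
        simp [hcell]
    · right
      refine ⟨(r', c'), pvMem_zip.2 ⟨(r' - r).toNat, ?_, ?_, ?_⟩, ?_⟩
      · rw [PySem.List.length_pyRange_one]; omega
      · rw [PySem.List.length_pyRange_neg_one]; omega
      · rw [pvGet_pyRange_one _ _ _ (by rw [PySem.List.length_pyRange_one]; omega),
            pvGet_pyRange_neg_one _ _ _ (by rw [PySem.List.length_pyRange_neg_one]; omega)]
        simp only [Prod.mk.injEq]
        constructor <;> omega
      · rw [if_neg (fun h => hrne h.1)]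
        simp [hcell]

lemma pvCross_iff (board : List (List Int)) (hs : pvShape board) (r c : Int)
    (hr0 : 0 ≤ r) (hr8 : r < 8) (hc0 : 0 ≤ c) (hc8 : c < 8) :
    pvHasQueenInCrossDiagonal board r c = true ↔
      ∃ q ∈ pvQueens board, q ≠ (r, c) ∧ q.1 - q.2 = r - c := by
  unfold pvHasQueenInCrossDiagonal
  rw [Bool.or_eq_true, List.any_eq_true, List.any_eq_true]
  constructor
  · rintro (⟨p, hp, hpred⟩ | ⟨p, hp, hpred⟩)
    · obtain ⟨k, h1, h2, rfl⟩ := pvMem_zip.1 hp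
      rw [PySem.List.length_pyRange_neg_one] at h1 h2
      rw [pvGet_pyRange_neg_one _ _ _ (by rw [PySem.List.length_pyRange_neg_one]; omega),
          pvGet_pyRange_neg_one _ _ _ (by rw [PySem.List.length_pyRange_neg_one]; omega)] at hpred
      by_cases hk0 : k = 0
      · subst hk0; simp at hpred
      · rw [if_neg (by simp only [not_and]; intro h; omega)] at hpred
        rw [beq_iff_eq] at hpred
        refine ⟨(r - k, c - k),
          (pvMem_queens board hs _ _).2 ⟨by omega, by omega, by omega, by omega, hpred⟩,
          by simp only [ne_eq, Prod.mk.injEq, not_and]; intro h; omega, by omega⟩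
    · obtain ⟨k, h1, h2, rfl⟩ := pvMem_zip.1 hp
      rw [PySem.List.length_pyRange_one] at h1 h2
      rw [pvGet_pyRange_one _ _ _ (by rw [PySem.List.length_pyRange_one]; omega),
          pvGet_pyRange_one _ _ _ (by rw [PySem.List.length_pyRange_one]; omega)] at hpred
      by_cases hk0 : k = 0
      · subst hk0; simp at hpred
      · rw [if_neg (by simp only [not_and]; intro h; omega)] at hpred
        rw [beq_iff_eq] at hpred
        refine ⟨(r + k, c + k),
          (pvMem_queens board hs _ _).2 ⟨by omega, by omega, by omega, by omega, hpred⟩,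
          by simp only [ne_eq, Prod.mk.injEq, not_and]; intro h; omega, by omega⟩
  · rintro ⟨⟨r', c'⟩, hq, hne, hdiff⟩
    obtain ⟨hr'0, hr'8, hc'0, hc'8, hcell⟩ := (pvMem_queens board hs r' c').1 hq
    simp only [ne_eq, Prod.mk.injEq, not_and] at hne
    have hrne : r' ≠ r := by
      intro h
      subst h
      exact hne rfl (by omega)
    by_cases hlt : r' < r
    · left
      refine ⟨(r', c'), pvMem_zip.2 ⟨(r - r').toNat, ?_, ?_, ?_⟩, ?_⟩
      · rw [PySem.List.length_pyRange_neg_one]; omega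
      · rw [PySem.List.length_pyRange_neg_one]; omega
      · rw [pvGet_pyRange_neg_one _ _ _ (by rw [PySem.List.length_pyRange_neg_one]; omega),
            pvGet_pyRange_neg_one _ _ _ (by rw [PySem.List.length_pyRange_neg_one]; omega)]
        simp only [Prod.mk.injEq]
        constructor <;> omega
      · rw [if_neg (fun h => hrne h.1)]
        simp [hcell]
    · right
      refine ⟨(r', c'), pvMem_zip.2 ⟨(r' - r).toNat, ?_, ?_, ?_⟩, ?_⟩
      · rw [PySem.List.length_pyRange_one]; omega
      · rw [PySem.List.length_pyRange_one]; omega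
      · rw [pvGet_pyRange_one _ _ _ (by rw [PySem.List.length_pyRange_one]; omega),
            pvGet_pyRange_one _ _ _ (by rw [PySem.List.length_pyRange_one]; omega)]
        simp only [Prod.mk.injEq]
        constructor <;> omega
      · rw [if_neg (fun h => hrne h.1)]
        simp [hcell]

lemma pvScan_iff (board : List (List Int)) (hs : pvShape board) :
    ((PySem.List.pyRange 0 8 1).any (fun row =>
      (PySem.List.pyRange 0 8 1).any fun column =>
        pvCellA board row column == 1 &&
          (pvHasQueenInRow board row column || pvHasQueenInColumn board row column ||
           pvHasQueenInMainDiagonal board row column || pvHasQueenInCrossDiagonal board row column)))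
      = true ↔ pvConf board := by
  rw [List.any_eq_true]
  constructor
  · rintro ⟨row, hrow, h2⟩
    rw [List.any_eq_true] at h2
    obtain ⟨col, hcol, h3⟩ := h2
    rw [PySem.List.mem_pyRange_one] at hrow hcol
    simp only [Bool.and_eq_true, beq_iff_eq, Bool.or_eq_true] at h3
    obtain ⟨hcell, hor⟩ := h3
    have hp : (row, col) ∈ pvQueens board :=
      (pvMem_queens board hs row col).2 ⟨hrow.1, hrow.2, hcol.1, hcol.2, hcell⟩
    rcases hor with ((h | h) | h) | h
    · obtain ⟨c', hmem, hne⟩ := (pvRow_iff board hs row col hrow.1 hrow.2).1 h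
      exact ⟨(row, col), hp, (row, c'), hmem,
        by simp only [ne_eq, Prod.mk.injEq, not_and]; intro _ hc'; exact hne hc', Or.inl rfl⟩
    · obtain ⟨r', hmem, hne⟩ := (pvCol_iff board hs row col hcol.1 hcol.2).1 h
      exact ⟨(row, col), hp, (r', col), hmem,
        by simp only [ne_eq, Prod.mk.injEq, not_and]; intro h' _; exact hne h',
        Or.inr (Or.inl rfl)⟩
    · obtain ⟨q, hmem, hne, hsum⟩ :=
        (pvMain_iff board hs row col hrow.1 hrow.2 hcol.1 hcol.2).1 h
      exact ⟨(row, col), hp, q, hmem, hne, Or.inr (Or.inr (Or.inl hsum.symm))⟩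
    · obtain ⟨q, hmem, hne, hdiff⟩ :=
        (pvCross_iff board hs row col hrow.1 hrow.2 hcol.1 hcol.2).1 h
      exact ⟨(row, col), hp, q, hmem, hne, Or.inr (Or.inr (Or.inr hdiff.symm))⟩
  · rintro ⟨⟨pr, pc⟩, hp, ⟨qr, qc⟩, hq, hne, hshare⟩
    obtain ⟨hr0, hr8, hc0, hc8, hcell⟩ := (pvMem_queens board hs pr pc).1 hp
    simp only [ne_eq, Prod.mk.injEq, not_and] at hne
    refine ⟨pr, PySem.List.mem_pyRange_one.2 ⟨hr0, hr8⟩, ?_⟩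
    rw [List.any_eq_true]
    refine ⟨pc, PySem.List.mem_pyRange_one.2 ⟨hc0, hc8⟩, ?_⟩
    simp only [Bool.and_eq_true, beq_iff_eq, Bool.or_eq_true]
    refine ⟨hcell, ?_⟩
    rcases hshare with h | h | h | h
    · refine Or.inl (Or.inl (Or.inl ?_))
      have h' : pr = qr := h
      refine (pvRow_iff board hs pr pc hr0 hr8).2 ⟨qc, by rw [h']; exact hq, ?_⟩
      intro hqc
      exact hne h'.symm hqc
    · refine Or.inl (Or.inl (Or.inr ?_))
      have h' : pc = qc := h
      refine (pvCol_iff board hs pr pc hc0 hc8).2 ⟨qr, by rw [h']; exact hq, ?_⟩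
      intro hqr
      exact hne hqr h'.symm
    · refine Or.inl (Or.inr ?_)
      refine (pvMain_iff board hs pr pc hr0 hr8 hc0 hc8).2
        ⟨(qr, qc), hq, ?_, h.symm⟩
      simp only [ne_eq, Prod.mk.injEq, not_and]
      exact hne
    · refine Or.inr ?_
      refine (pvCross_iff board hs pr pc hr0 hr8 hc0 hc8).2
        ⟨(qr, qc), hq, ?_, h.symm⟩
      simp only [ne_eq, Prod.mk.injEq, not_and]
      exact hne

lemma pvOfList_lt (l : List Int) (h : ¬ l.Nodup) :
    (PySem.Set.ofList l).length < l.length := by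
  have hn : (PySem.Set.ofList l).Nodup := PySem.Set.nodup_ofList l
  have hts : (PySem.Set.ofList l).toFinset = l.toFinset := by
    ext x
    simp [List.mem_toFinset, PySem.Set.mem_ofList]
  have h1 : (PySem.Set.ofList l).length = l.toFinset.card := by
    rw [← hts]
    exact (List.toFinset_card_of_nodup hn).symm
  have h2 : l.toFinset.card ≤ l.length := List.toFinset_card_le l
  have h3 : l.toFinset.card ≠ l.length := by
    intro he
    apply h
    have := Multiset.toFinset_card_eq_card_iff_nodup (m := (l : Multiset Int))
    simpa using this.mp (by simpa using he)
  omega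

lemma pvB0_iff (board : List (List Int)) (hq : (pvQueens board).length = 8) :
    (pvKeys.any fun key => decide ((PySem.Set.ofList ((pvQueens board).map key)).length < 8)) = true
      ↔ pvConf board := by
  rw [List.any_eq_true]
  have hnd := pvNodup_queens board
  constructor
  · rintro ⟨f, hf, hlt⟩
    rw [decide_eq_true_eq] at hlt
    have hnn : ¬ ((pvQueens board).map f).Nodup := by
      intro hnod
      rw [PySem.Set.ofList_eq_self_of_nodup _ hnod, List.length_map, hq] at hlt
      omega
    rw [List.nodup_map_iff_inj_on hnd] at hnn
    push_neg at hnn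
    obtain ⟨p, hp, q, hq2, hfeq, hpq⟩ := hnn
    refine ⟨p, hp, q, hq2, Ne.symm hpq, ?_⟩
    simp only [pvKeys, List.mem_cons, List.not_mem_nil, or_false] at hf
    rcases hf with rfl | rfl | rfl | rfl
    · exact Or.inl hfeq
    · exact Or.inr (Or.inl hfeq)
    · exact Or.inr (Or.inr (Or.inr (by simpa using hfeq)))
    · exact Or.inr (Or.inr (Or.inl (by simpa using hfeq)))
  · rintro ⟨p, hp, q, hq2, hne, hshare⟩
    have key : ∀ f : (Int × Int) → Int, f ∈ pvKeys → f p = f q →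
        ∃ f' ∈ pvKeys,
          (decide ((PySem.Set.ofList ((pvQueens board).map f')).length < 8)) = true := by
      intro f hf hfeq
      refine ⟨f, hf, ?_⟩
      rw [decide_eq_true_eq]
      have hnn : ¬ ((pvQueens board).map f).Nodup := by
        rw [List.nodup_map_iff_inj_on hnd]
        push_neg
        exact ⟨p, hp, q, hq2, hfeq, fun h => hne (h ▸ rfl)⟩
      have := pvOfList_lt _ hnn
      rwa [List.length_map, hq] at this
    rcases hshare with h | h | h | h
    · exact key _ (by simp [pvKeys]) h
    · exact key _ (by simp [pvKeys]) h
    · exact key (fun p => p.1 + p.2) (by simp [pvKeys]) (by simpa using h)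
    · exact key (fun p => p.1 - p.2) (by simp [pvKeys]) (by simpa using h)

-- ===== VERDICT (by name: the statement is the Claim_ definition above) =====
theorem is_solution_to_8_queens_problem_spec : Claim_equal_is_solution_to_8_queens_problem := by
  intro board _
  unfold Spec_is_solution_to_8_queens_problem is_solution_to_8_queens_problem
    is_solution_to_8_queens_problem_alt
  by_cases hs : pvShape board
  · have hv : pvIsValidBoard board = true := (pvValid_iff board).2 hs
    have hg : ¬ (board.length ≠ 8 ∨ (board.any fun row => decide (row.length ≠ 8)) = true) := by
      simp only [List.any_eq_true, decide_eq_true_eq]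
      push_neg
      exact ⟨hs.1, fun row hrow => hs.2 row hrow⟩
    by_cases hq : (pvQueens board).length = 8
    · have h8 : pvHasEightQueens board = true := (pvCount_iff board).2 hq
      rw [hv, h8, if_neg hg]
      simp only [Bool.not_true, if_neg (by simp : ¬ ((false : Bool) = true))]
      rw [if_neg (by omega : ¬ (pvQueens board).length ≠ 8)]
      by_cases hc : pvConf board
      · rw [if_pos ((pvScan_iff board hs).2 hc), if_pos ((pvB0_iff board hq).2 hc)]
      · rw [if_neg (fun h => hc ((pvScan_iff board hs).1 h)),
            if_neg (fun h => hc ((pvB0_iff board hq).1 h))]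
    · have h8 : pvHasEightQueens board = false := by
        cases h : pvHasEightQueens board
        · rfl
        · exact absurd ((pvCount_iff board).1 h) hq
      simp [hv, h8, hg, hq]
  · have hv : pvIsValidBoard board = false := by
      cases h : pvIsValidBoard board
      · rfl
      · exact absurd ((pvValid_iff board).1 h) hs
    have hg : board.length ≠ 8 ∨ (board.any fun row => decide (row.length ≠ 8)) = true := by
      by_cases hl : board.length = 8
      · right
        rw [List.any_eq_true]
        by_contra hno
        push_neg at hno
        exact hs ⟨hl, fun row hrow => by simpa using hno row hrow⟩
      · exact Or.inl hl
    rw [hv, if_pos hg]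
    simp
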